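-- pv_equiv track=rewrite | github.com/yuseonkim/COdingTEstFromHell | DOGYUN/test/test_3.py | solution
-- ===== SOURCE A (Python) =====
-- from itertools import combinations
--
-- def solution(dice):
--   answer = []
--   max_count = 0
--   result_index = None
--
--   combinations_list = list(combinations(dice, len(dice)//2))
--
--   for combination in combinations_list:
--     a = list(combination) # A가 뽑은 것
--     b = [dic for dic in dice if dic not in a] # B가 뽑은 것
--     # A가 가지는 수 & B가 가지는 수
--     a_one_dimension = [element for row in a for element in row]
--     a_one_dimension.sort(reverse=True)
--     a_index = [dice.index(selected_dice) + 1 for selected_dice in a]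
--
--     b_one_dimension = [element for row in b for element in row]
--     b_one_dimension.sort(reverse=True)
--     b_index = [dice.index(selected_dice) + 1 for selected_dice in b]
--
--     count = sum(1 for a_val in a_one_dimension for b_val in b_one_dimension if a_val > b_val)
--
--     if count >= len(a_one_dimension) // 2 + 1:
--       if count > max_count:
--         max_count = count
--         result_index = (a_index, b_index)
--
--     answer = result_index[0]
--
--   return answer
-- ===== SOURCE B (Python) =====
-- from itertools import combinations
--
-- def solution(dice):
--   n = len(dice)
--   half = n // 2
--   # precompute pairwise win counts between dice once, so each split is O(n^2)
--   wins = [[sum(1 for x in di for y in dj if x > y) for dj in dice] for di in dice]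
--   sizes = [len(d) for d in dice]
--   best = 0
--   best_pick = []
--   for comb in combinations(range(n), half):
--     rest = [j for j in range(n) if j not in comb]
--     count = sum(wins[i][j] for i in comb for j in rest)
--     if count >= sum(sizes[i] for i in comb) // 2 + 1 and count > best:
--       best = count
--       best_pick = [i + 1 for i in comb]
--   return best_pick
-- ===== Notes on version B (the rewrite author's own statement) =====
-- stated objective: faster
-- what changed: B precomputes an n-by-n table of pairwise win counts between dice once and enumerates splits by index, so each candidate split costs O(n^2) table additions instead of A's O(m^2) comparisons of all flattened (and re-sorted) faces per split.
-- outside the precondition, e.g. on solution([[5], [5], [1], [1]]): A returns [1, 1], B returns [1, 2]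
import Mathlib
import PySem

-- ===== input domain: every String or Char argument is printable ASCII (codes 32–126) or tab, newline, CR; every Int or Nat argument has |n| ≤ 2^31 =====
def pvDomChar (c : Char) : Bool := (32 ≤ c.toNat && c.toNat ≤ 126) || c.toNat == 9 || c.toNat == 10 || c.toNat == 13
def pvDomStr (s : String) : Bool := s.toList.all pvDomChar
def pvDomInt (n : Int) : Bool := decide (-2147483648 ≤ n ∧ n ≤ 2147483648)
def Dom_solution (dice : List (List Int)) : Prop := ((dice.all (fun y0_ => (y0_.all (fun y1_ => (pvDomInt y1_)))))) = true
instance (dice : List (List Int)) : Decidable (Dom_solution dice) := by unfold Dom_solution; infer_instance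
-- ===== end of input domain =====

-- B replaces A's per-split O(m^2) face comparison with a pairwise-win table over dice
-- computed once, and enumerates splits by index; equivalence is about the return value only.

-- ===== PORT A =====
def solution (dice : List (List Int)) : List Int :=
  -- state: (answer, max_count, result_index)
  let combinations_list := PySem.List.combinations dice (dice.length / 2)
  let st := combinations_list.foldl
    (fun (s : List Int × Int × Option (List Int × List Int)) combination =>
      let a := combination
      let b := dice.filter (fun dic => !(a.contains dic))
      let a_one_dimension := PySem.List.sorted a.flatten (fun x => x) true
      let a_index := a.map (fun d => ((PySem.List.index? dice d).getD 0 : Int) + 1)  -- d ∈ dice always: ValueError unreachable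
      let b_one_dimension := PySem.List.sorted b.flatten (fun x => x) true
      let b_index := b.map (fun d => ((PySem.List.index? dice d).getD 0 : Int) + 1)
      let count : Int := a_one_dimension.foldl
        (fun c a_val => b_one_dimension.foldl (fun c2 b_val => if a_val > b_val then c2 + 1 else c2) c) 0
      let s1 := if count ≥ PySem.Int.floordiv (a_one_dimension.length : Int) 2 + 1 then
          (if count > s.2.1 then (s.1, count, some (a_index, b_index)) else s)
        else s
      (match s1.2.2 with
       | some r => r.1
       | none => []   -- Python: answer = result_index[0] raises TypeError here; such inputs are outside Pre_solution
       , s1.2.1, s1.2.2))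
    ([], 0, none)
  st.1

-- ===== PORT B =====
-- wins[i][j] = sum(1 for x in dice[i] for y in dice[j] if x > y)
def pvPairWins (di dj : List Int) : Int := (di.map (fun x => ((dj.countP (fun y => x > y)) : Int))).sum

def solution_alt (dice : List (List Int)) : List Int :=
  let n := dice.length
  let half := n / 2
  let wins := dice.map (fun di => dice.map (fun dj => pvPairWins di dj))
  let sizes := dice.map (fun d => (d.length : Int))
  -- range(n) holds the indices 0..n-1 (all nonnegative), represented as Nat
  let st := (PySem.List.combinations (List.range n) half).foldl
    (fun (s : Int × List Int) comb =>
      let rest := (List.range n).filter (fun j => !(comb.contains j))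
      let count : Int := (comb.map (fun i => (rest.map (fun j => (wins.getD i []).getD j 0)).sum)).sum
      if count ≥ PySem.Int.floordiv ((comb.map (fun i => sizes.getD i 0)).sum) 2 + 1 ∧ count > s.1 then
        (count, comb.map (fun i => Int.ofNat i + 1))
      else s)
    (0, [])
  st.2

-- ===== PRECONDITION & SPEC =====
-- number of pairs (x, y) with x from xs, y from ys and x > y
def pvPairGT (xs ys : List Int) : Nat := (xs.map (fun x => ys.countP (fun y => x > y))).sum

-- Pre_ excludes (i) inputs whose first half-vs-rest split misses A's threshold — there A's first
-- iteration evaluates result_index[0] with result_index = None and raises TypeError — and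
-- (ii) dice lists containing duplicate dice, where A's value-based complement and dice.index
-- make the returned indices an accidental first-match artefact.
def Pre_solution (dice : List (List Int)) : Prop :=
  dice.Nodup ∧
  ((dice.take (dice.length / 2)).flatten.length / 2) + 1 ≤
    pvPairGT (dice.take (dice.length / 2)).flatten (dice.drop (dice.length / 2)).flatten
instance (dice : List (List Int)) : Decidable (Pre_solution dice) := by unfold Pre_solution; infer_instance

def pvWitness_solution : List (List Int) := [[2], [1]]

def Spec_solution (dice : List (List Int)) (out : List Int) : Prop := out = solution_alt dice
instance (dice : List (List Int)) (out : List Int) : Decidable (Spec_solution dice out) := by unfold Spec_solution; infer_instance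

-- ===== CLAIM (what is proved, stated in full; the proofs are below) =====
def Claim_equal_solution : Prop := ∀ (dice : List (List Int)), Dom_solution dice → Pre_solution dice → Spec_solution dice (solution dice)

-- ===== LEMMAS AND PROOFS =====

theorem pv_getD_eq {α} (d : α) (xs : List α) (i : Nat) (h : i < xs.length) : xs.getD i d = xs[i] := by
  simp [List.getD_eq_getElem?_getD, List.getElem?_eq_getElem h]

theorem pv_range_map_getD {α} (d : α) (xs : List α) : (List.range xs.length).map (fun i => xs.getD i d) = xs := by
  apply List.ext_getElem
  · simp
  · intro i h1 h2; simp [List.getElem?_eq_getElem h2]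

theorem pv_idx_self (xs : List (List Int)) (hn : xs.Nodup) (i : Nat) (h : i < xs.length) :
    PySem.List.index? xs (xs.getD i []) = some i := by
  rw [pv_getD_eq [] xs i h, PySem.List.index?_eq_idxOf?, List.idxOf?_eq_some_iff]
  exact ⟨h, rfl, fun j hj => hn.getElem_inj_iff.not.mpr (by omega)⟩

-- membership in c.map g decided by index (nodup)
theorem pv_mem_map_getD_iff (dice : List (List Int)) (hnd : dice.Nodup) (c : List Nat)
    (hc : ∀ i ∈ c, i < dice.length) (j : Nat) (hj : j < dice.length) :
    (dice.getD j [] ∈ c.map (fun i => dice.getD i [])) ↔ j ∈ c := by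
  constructor
  · rintro hm
    obtain ⟨i, hi, he⟩ := List.mem_map.mp hm
    have hilt := hc i hi
    rw [pv_getD_eq [] dice i hilt, pv_getD_eq [] dice j hj] at he
    exact (hnd.getElem_inj_iff).mp he ▸ hi
  · intro hm; exact List.mem_map.mpr ⟨j, hm, rfl⟩

-- A's complement-by-value equals B's complement-by-index mapped through the dice
theorem pv_filter_eq (dice : List (List Int)) (hnd : dice.Nodup) (c : List Nat)
    (hc : ∀ i ∈ c, i < dice.length) :
    dice.filter (fun dic => !((c.map (fun i => dice.getD i [])).contains dic))
      = ((List.range dice.length).filter (fun j => !(c.contains j))).map (fun i => dice.getD i []) := by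
  set p := (fun dic => !((c.map (fun i => dice.getD i [])).contains dic)) with hp
  conv_lhs => rw [← pv_range_map_getD [] dice]
  rw [List.filter_map]
  congr 1
  apply List.filter_congr
  intro j hj
  have hjlt : j < dice.length := List.mem_range.mp hj
  simp only [hp, Function.comp, List.contains_eq_mem]
  rw [decide_eq_decide.mpr (pv_mem_map_getD_iff dice hnd c hc j hjlt)]

-- the index list A computes is just the chosen indices + 1
theorem pv_aidx_eq (dice : List (List Int)) (hnd : dice.Nodup) (c : List Nat)
    (hc : ∀ i ∈ c, i < dice.length) :
    (c.map (fun i => dice.getD i [])).map (fun d => ((PySem.List.index? dice d).getD 0 : Int) + 1)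
      = c.map (fun i => Int.ofNat i + 1) := by
  simp only [List.map_map]
  apply List.map_congr_left
  intro i hi
  show ((PySem.List.index? dice (dice.getD i [])).getD 0 : Int) + 1 = Int.ofNat i + 1
  rw [pv_idx_self dice hnd i (hc i hi)]
  rfl

theorem pv_sum_swap {α β : Type} (l1 : List α) (l2 : List β) (f : α → β → Int) :
    (l1.map (fun i => (l2.map (fun j => f i j)).sum)).sum
      = (l2.map (fun j => (l1.map (fun i => f i j)).sum)).sum := by
  induction l1 with
  | nil => simp
  | cons a t ih => simp [ih, List.sum_map_add]

theorem pv_getD_map {α β : Type} (d : β) (f : α → β) (xs : List α) (i : Nat) (h : i < xs.length) :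
    (xs.map f).getD i d = f xs[i] := by
  rw [pv_getD_eq d (xs.map f) i (by simpa using h)]
  simp

theorem pv_sum_flatMap {α : Type} (c : List α) (f : α → List Int) :
    (c.flatMap f).sum = (c.map (fun i => (f i).sum)).sum := by
  rw [List.flatMap_def, List.sum_flatten, List.map_map]
  rfl

theorem pv_cast_sum (l : List Nat) : ((l.sum : Nat) : Int) = (l.map (fun (x : Nat) => (x : Int))).sum := by
  induction l with
  | nil => rfl
  | cons a t ih => simp [ih]

-- A's nested-loop count over the two sorted flattened halves equals B's table sum
theorem pv_cnt_eq (dice : List (List Int)) (hnd : dice.Nodup) (c : List Nat)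
    (hc : ∀ i ∈ c, i < dice.length) :
    (PySem.List.sorted (c.map (fun i => dice.getD i [])).flatten (fun x => x) true).foldl
      (fun acc a_val =>
        (PySem.List.sorted (dice.filter (fun dic => !((c.map (fun i => dice.getD i [])).contains dic))).flatten (fun x => x) true).foldl
          (fun c2 b_val => if a_val > b_val then c2 + 1 else c2) acc) 0
      = (c.map (fun i =>
          (((List.range dice.length).filter (fun j => !(c.contains j))).map (fun j =>
            ((dice.map (fun di => dice.map (fun dj => pvPairWins di dj))).getD i []).getD j 0)).sum)).sum := by
  have hb := pv_filter_eq dice hnd c hc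
  rw [hb]
  set rest := (List.range dice.length).filter (fun j => !(c.contains j)) with hrest
  have hrlt : ∀ j ∈ rest, j < dice.length := by
    intro j hj; exact List.mem_range.mp (List.mem_of_mem_filter hj)
  -- collapse the inner loop to a countP, outer loop to a sum
  have step1 : ∀ (b1 : List Int) (acc : Int) (a_val : Int),
      b1.foldl (fun c2 b_val => if a_val > b_val then c2 + 1 else c2) acc
        = acc + (b1.countP (fun b_val => a_val > b_val) : Int) := by
    intro b1 acc a_val
    exact PySem.List.foldl_ite_add_one (fun b_val => a_val > b_val) b1 acc
  -- outer loop becomes a sum of per-value counts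
  have hfun : (fun (acc : Int) (a_val : Int) =>
      (PySem.List.sorted ((rest.map (fun i => dice.getD i [])).flatten) (fun x => x) true).foldl
        (fun c2 b_val => if a_val > b_val then c2 + 1 else c2) acc)
      = (fun acc a_val => acc + ((rest.map (fun i => dice.getD i [])).flatten.countP (fun b_val => a_val > b_val) : Int)) := by
    funext acc a_val
    rw [step1, List.Perm.countP_eq _ (PySem.List.sorted_perm ((rest.map (fun i => dice.getD i [])).flatten) (fun x => x) true)]
  rw [hfun, PySem.List.foldl_add]
  rw [List.Perm.sum_eq (List.Perm.map _ (PySem.List.sorted_perm ((c.map (fun i => dice.getD i [])).flatten) (fun x => x) true))]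
  -- RHS: table lookups are pvPairWins of the dice
  rw [List.map_congr_left (f := fun i =>
        (rest.map (fun j => ((dice.map (fun di => dice.map (fun dj => pvPairWins di dj))).getD i []).getD j 0)).sum)
      (g := fun i => (rest.map (fun j => pvPairWins (dice.getD i []) (dice.getD j []))).sum)
      (fun i hi => by
        apply congrArg
        apply List.map_congr_left
        intro j hj
        rw [pv_getD_map [] _ dice i (hc i hi), pv_getD_map 0 _ dice j (hrlt j hj)]
        rw [pv_getD_eq [] dice i (hc i hi), pv_getD_eq [] dice j (hrlt j hj)])]
  -- LHS: counts over the flattened complement split into per-die counts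
  rw [zero_add]
  have hcount : ∀ a_val : Int,
      ((((rest.map (fun i => dice.getD i [])).flatten).countP (fun b_val => a_val > b_val) : Nat) : Int)
        = (rest.map (fun j => (((dice.getD j []).countP (fun b_val => a_val > b_val) : Nat) : Int))).sum := by
    intro a_val
    rw [List.countP_flatten, List.map_map, pv_cast_sum, List.map_map]
    rfl
  rw [List.map_congr_left (fun a _ => hcount a)]
  rw [← List.flatMap_def, List.map_flatMap, pv_sum_flatMap]
  apply congrArg List.sum
  apply List.map_congr_left
  intro i _
  rw [pv_sum_swap (dice.getD i []) rest (fun a j => (((dice.getD j []).countP (fun b_val => a > b_val) : Nat) : Int))]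
  rfl


theorem pv_comb_eq (dice : List (List Int)) :
    PySem.List.combinations dice (dice.length / 2)
      = (PySem.List.combinations (List.range dice.length) (dice.length / 2)).map (List.map (fun i => dice.getD i [])) := by
  have h := PySem.List.combinations_map (fun i => dice.getD i []) (List.range dice.length) (dice.length / 2)
  rw [pv_range_map_getD] at h
  exact h


theorem pv_len_eq (dice : List (List Int)) (c : List Nat) (hc : ∀ i ∈ c, i < dice.length) :
    ((PySem.List.sorted (c.map (fun i => dice.getD i [])).flatten (fun x => x) true).length : Int)
      = (c.map (fun i => (dice.map (fun d => (d.length : Int))).getD i 0)).sum := by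
  rw [PySem.List.length_sorted, List.length_flatten, List.map_map, pv_cast_sum, List.map_map]
  apply congrArg List.sum
  apply List.map_congr_left
  intro i hi
  rw [pv_getD_map 0 _ dice i (hc i hi)]
  show ((dice.getD i []).length : Int) = _
  rw [pv_getD_eq [] dice i (hc i hi)]

-- canonical per-combination data (B's terms)
def pvCnt (dice : List (List Int)) (c : List Nat) : Int :=
  (c.map (fun i => (((List.range dice.length).filter (fun j => !(c.contains j))).map (fun j =>
    ((dice.map (fun di => dice.map (fun dj => pvPairWins di dj))).getD i []).getD j 0)).sum)).sum
def pvThr (dice : List (List Int)) (c : List Nat) : Int :=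
  PySem.Int.floordiv ((c.map (fun i => (dice.map (fun d => (d.length : Int))).getD i 0)).sum) 2 + 1
def pvPick (c : List Nat) : List Int := c.map (fun i => Int.ofNat i + 1)
def pvBidx (dice : List (List Int)) (c : List Nat) : List Int :=
  (((List.range dice.length).filter (fun j => !(c.contains j))).map (fun i => dice.getD i [])).map
    (fun d => ((PySem.List.index? dice d).getD 0 : Int) + 1)

def pvStepA (dice : List (List Int)) (s : List Int × Int × Option (List Int × List Int)) (c : List Nat) :
    List Int × Int × Option (List Int × List Int) :=
  let s1 := if pvCnt dice c ≥ pvThr dice c then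
      (if pvCnt dice c > s.2.1 then (s.1, pvCnt dice c, some (pvPick c, pvBidx dice c)) else s)
    else s
  (match s1.2.2 with | some r => r.1 | none => [], s1.2.1, s1.2.2)

def pvStepB (dice : List (List Int)) (s : Int × List Int) (c : List Nat) : Int × List Int :=
  if pvCnt dice c ≥ pvThr dice c ∧ pvCnt dice c > s.1 then (pvCnt dice c, pvPick c) else s

def pvRel (sA : List Int × Int × Option (List Int × List Int)) (sB : Int × List Int) : Prop :=
  sA.2.1 = sB.1 ∧ ((sA.2.2 = none ∧ sA.1 = [] ∧ sB.2 = []) ∨ (∃ bi, sA.2.2 = some (sB.2, bi) ∧ sA.1 = sB.2))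

theorem pv_step_rel (dice : List (List Int)) (c : List Nat) (sA : List Int × Int × Option (List Int × List Int))
    (sB : Int × List Int) (h : pvRel sA sB) : pvRel (pvStepA dice sA c) (pvStepB dice sB c) := by
  obtain ⟨a1, mx, ri⟩ := sA
  obtain ⟨bb, bp⟩ := sB
  obtain ⟨h1, h2⟩ := h
  simp only at h1
  subst h1
  unfold pvStepA pvStepB
  by_cases hth : pvCnt dice c ≥ pvThr dice c
  · by_cases hgt : pvCnt dice c > mx
    · simp only [hth, hgt, and_self, if_pos]
      exact ⟨rfl, Or.inr ⟨pvBidx dice c, rfl, rfl⟩⟩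
    · simp only [hth, hgt, and_false, if_pos, if_neg, not_false_iff]
      rcases h2 with ⟨hn, ha, hb⟩ | ⟨bi, hs, ha⟩
      · simp only at hn hb ha
        subst hn hb
        exact ⟨rfl, Or.inl ⟨rfl, rfl, rfl⟩⟩
      · simp only at hs ha
        subst hs
        exact ⟨rfl, Or.inr ⟨bi, rfl, rfl⟩⟩
  · simp only [hth, false_and, if_neg, not_false_iff]
    rcases h2 with ⟨hn, ha, hb⟩ | ⟨bi, hs, ha⟩
    · simp only at hn hb ha
      subst hn hb
      exact ⟨rfl, Or.inl ⟨rfl, rfl, rfl⟩⟩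
    · simp only at hs ha
      subst hs
      exact ⟨rfl, Or.inr ⟨bi, rfl, rfl⟩⟩

theorem pv_fold_rel (dice : List (List Int)) (cs : List (List Nat)) (sA : List Int × Int × Option (List Int × List Int))
    (sB : Int × List Int) (h : pvRel sA sB) : pvRel (cs.foldl (pvStepA dice) sA) (cs.foldl (pvStepB dice) sB) := by
  induction cs generalizing sA sB with
  | nil => exact h
  | cons c t ih => exact ih _ _ (pv_step_rel dice c sA sB h)

theorem pv_stepA_eq (dice : List (List Int)) (hnd : dice.Nodup) (c : List Nat) (hc : ∀ i ∈ c, i < dice.length)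
    (s : List Int × Int × Option (List Int × List Int)) :
    (let a := c.map (fun i => dice.getD i [])
     let b := dice.filter (fun dic => !(a.contains dic))
     let a_one_dimension := PySem.List.sorted a.flatten (fun x => x) true
     let a_index := a.map (fun d => ((PySem.List.index? dice d).getD 0 : Int) + 1)
     let b_index := b.map (fun d => ((PySem.List.index? dice d).getD 0 : Int) + 1)
     let count : Int := a_one_dimension.foldl
       (fun c2 a_val => (PySem.List.sorted b.flatten (fun x => x) true).foldl
         (fun c3 b_val => if a_val > b_val then c3 + 1 else c3) c2) 0
     let s1 := if count ≥ PySem.Int.floordiv (a_one_dimension.length : Int) 2 + 1 then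
         (if count > s.2.1 then (s.1, count, some (a_index, b_index)) else s)
       else s
     ((match s1.2.2 with | some r => r.1 | none => []), s1.2.1, s1.2.2))
      = pvStepA dice s c := by
  simp only []
  rw [pv_cnt_eq dice hnd c hc, pv_aidx_eq dice hnd c hc, pv_len_eq dice c hc, pv_filter_eq dice hnd c hc]
  rfl

theorem pv_main (dice : List (List Int)) (hnd : dice.Nodup) : solution dice = solution_alt dice := by
  simp only [solution, solution_alt]
  rw [pv_comb_eq, List.foldl_map]
  have hsub : ∀ c ∈ PySem.List.combinations (List.range dice.length) (dice.length / 2), ∀ i ∈ c, i < dice.length := by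
    intro c hcm i hi
    exact List.mem_range.mp (((PySem.List.mem_combinations_iff _ _ _).mp hcm).1.subset hi)
  rw [PySem.List.foldl_congr_mem _ _ (pvStepA dice) _ (fun acc c hcm => pv_stepA_eq dice hnd c (hsub c hcm) acc)]
  show (List.foldl (pvStepA dice) ([], 0, none) (PySem.List.combinations (List.range dice.length) (dice.length / 2))).1
      = (List.foldl (pvStepB dice) (0, []) (PySem.List.combinations (List.range dice.length) (dice.length / 2))).2
  have hrel := pv_fold_rel dice (PySem.List.combinations (List.range dice.length) (dice.length / 2))
      ([], 0, none) (0, []) ⟨rfl, Or.inl ⟨rfl, rfl, rfl⟩⟩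
  obtain ⟨-, hf⟩ := hrel
  rcases hf with ⟨-, ha, hb⟩ | ⟨bi, -, ha⟩
  · rw [ha, hb]
  · exact ha

-- ===== VERDICT (by name: the statement is the Claim_ definition above) =====
theorem solution_spec : Claim_equal_solution := by
  intro dice _ hpre
  unfold Spec_solution
  exact pv_main dice hpre.1
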